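-- pv_equiv track=rewrite | github.com/ml4t/diagnostic | scripts/generate_agent_docs.py | get_first_line
-- ===== SOURCE A (Python) =====
-- def get_first_line(docstring: str | None) -> str:
--     """Extract first non-empty line from docstring."""
--     if not docstring:
--         return ""
--     for line in docstring.strip().split("\n"):
--         line = line.strip()
--         if line:
--             return line
--     return ""
-- ===== SOURCE B (Python) =====
-- def get_first_line(docstring):
--     """Extract first non-empty line from docstring."""
--     if not docstring:
--         return ""
--     return docstring.strip().split("\n", 1)[0].strip()
-- ===== Notes on version B (the rewrite author's own statement) =====
-- stated objective: simpler
-- what changed: The loop over all lines with an early return is replaced by a closed-form expression: after strip() the first line is always the first non-empty one, so B takes split('\n', 1)[0] and strips it; no iteration over lines remains.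
import Mathlib
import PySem

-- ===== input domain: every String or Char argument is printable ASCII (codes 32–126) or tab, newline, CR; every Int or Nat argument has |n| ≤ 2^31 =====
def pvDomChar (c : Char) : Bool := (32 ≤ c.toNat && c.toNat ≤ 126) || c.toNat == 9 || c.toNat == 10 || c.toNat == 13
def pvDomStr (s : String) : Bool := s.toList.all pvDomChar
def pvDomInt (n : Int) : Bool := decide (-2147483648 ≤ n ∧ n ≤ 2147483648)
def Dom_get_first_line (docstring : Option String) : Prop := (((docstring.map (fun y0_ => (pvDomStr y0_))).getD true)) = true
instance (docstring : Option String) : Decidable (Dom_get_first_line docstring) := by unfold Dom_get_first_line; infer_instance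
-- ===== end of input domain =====

-- B replaces A's loop over the lines with the closed form strip().split("\n",1)[0].strip():
-- after strip() the first line is always the first non-empty one (objective: simpler).


-- ===== PORT A =====
-- A's for-loop over docstring.strip().split("\n"): return the first line whose strip()
-- is non-empty, else "".
def glLoop : List (List Char) → List Char
  | [] => []
  | l :: ls =>
    let l' := PySem.Chars.strip l
    if l' ≠ [] then l' else glLoop ls

def get_first_line (docstring : Option String) : String :=
  match docstring with
  | none => ""
  | some s =>
    if s = "" then ""
    else String.ofList (glLoop (PySem.Chars.splitOn (PySem.Chars.strip s.toList) ['\n']))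

-- ===== PORT B =====
-- B: docstring.strip().split("\n", 1)[0].strip() — no loop; the [] branch is a totality
-- guard only (split never returns an empty list).
def get_first_line_alt (docstring : Option String) : String :=
  match docstring with
  | none => ""
  | some s =>
    if s = "" then ""
    else
      match PySem.Chars.splitOnMax (PySem.Chars.strip s.toList) ['\n'] 1 with
      | first :: _ => String.ofList (PySem.Chars.strip first)
      | [] => ""

-- ===== PRECONDITION & SPEC =====
def Spec_get_first_line (docstring : Option String) (out : String) : Prop := out = get_first_line_alt docstring
instance (docstring : Option String) (out : String) : Decidable (Spec_get_first_line docstring out) := by unfold Spec_get_first_line; infer_instance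

-- ===== CLAIM (what is proved, stated in full; the proofs are below) =====
def Claim_equal_get_first_line : Prop := ∀ (docstring : Option String), Dom_get_first_line docstring → Spec_get_first_line docstring (get_first_line docstring)

-- ===== LEMMAS AND PROOFS =====

-- splitOnMax.go with split budget 0 returns immediately.
theorem goMax_zero (sep : List Char) (fuel : Nat) (l cur : List Char) (acc : List (List Char)) :
    PySem.Chars.splitOnMax.go sep fuel 0 l cur acc = ((cur.reverse ++ l) :: acc).reverse := by
  cases fuel with
  | zero => simp [PySem.Chars.splitOnMax.go]
  | succ n => cases l with
    | nil => simp [PySem.Chars.splitOnMax.go]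
    | cons c r => simp [PySem.Chars.splitOnMax.go]

-- The first piece produced by splitOn.go on separator "\n" is cur.reverse ++ (l up to the first '\n').
theorem goA_head (fuel : Nat) : ∀ (l cur : List Char) (acc : List (List Char)), l.length ≤ fuel →
    ∃ rest, PySem.Chars.splitOn.go ['\n'] fuel l cur acc
      = acc.reverse ++ (cur.reverse ++ l.takeWhile (fun c => c != '\n')) :: rest := by
  induction fuel with
  | zero =>
    intro l cur acc h
    have : l = [] := List.eq_nil_of_length_eq_zero (Nat.le_zero.mp h)
    subst this
    exact ⟨[], by simp [PySem.Chars.splitOn.go]⟩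
  | succ n ih =>
    intro l cur acc h
    cases l with
    | nil => exact ⟨[], by simp [PySem.Chars.splitOn.go]⟩
    | cons c r =>
      by_cases hc : c = '\n'
      · subst hc
        have hpre : List.isPrefixOf ['\n'] ('\n' :: r) = true := by simp [List.isPrefixOf]
        obtain ⟨rest, hr⟩ := ih r [] (cur.reverse :: acc) (by simpa using Nat.le_of_succ_le_succ h)
        refine ⟨(r.takeWhile (fun c => c != '\n')) :: rest, ?_⟩
        simp only [PySem.Chars.splitOn.go, hpre, if_pos]
        simp at hr ⊢
        simp [hr]
      · have hpre : List.isPrefixOf ['\n'] (c :: r) = false := by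
          simp [List.isPrefixOf]; exact fun h => absurd h.symm hc
        obtain ⟨rest, hr⟩ := ih r (c :: cur) acc (by simpa using Nat.le_of_succ_le_succ h)
        refine ⟨rest, ?_⟩
        have hb : (c != '\n') = true := by simpa using hc
        simp only [PySem.Chars.splitOn.go, hpre]
        simp [hr, hb]

-- Same first-piece fact for splitOnMax.go with budget 1 (B's split("\n", 1)).
theorem goB_head (fuel : Nat) : ∀ (l cur : List Char) (acc : List (List Char)), l.length ≤ fuel →
    ∃ rest, PySem.Chars.splitOnMax.go ['\n'] fuel 1 l cur acc
      = acc.reverse ++ (cur.reverse ++ l.takeWhile (fun c => c != '\n')) :: rest := by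
  induction fuel with
  | zero =>
    intro l cur acc h
    have : l = [] := List.eq_nil_of_length_eq_zero (Nat.le_zero.mp h)
    subst this
    exact ⟨[], by simp [PySem.Chars.splitOnMax.go]⟩
  | succ n ih =>
    intro l cur acc h
    cases l with
    | nil => exact ⟨[], by simp [PySem.Chars.splitOnMax.go]⟩
    | cons c r =>
      by_cases hc : c = '\n'
      · subst hc
        have hpre : List.isPrefixOf ['\n'] ('\n' :: r) = true := by simp [List.isPrefixOf]
        refine ⟨[r], ?_⟩
        simp only [PySem.Chars.splitOnMax.go, hpre, if_pos]
        simp [goMax_zero]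
      · have hpre : List.isPrefixOf ['\n'] (c :: r) = false := by
          simp [List.isPrefixOf]; exact fun h => absurd h.symm hc
        obtain ⟨rest, hr⟩ := ih r (c :: cur) acc (by simpa using Nat.le_of_succ_le_succ h)
        refine ⟨rest, ?_⟩
        have hb : (c != '\n') = true := by simpa using hc
        simp only [PySem.Chars.splitOnMax.go, hpre]
        simp [hr, hb]

-- The head of a non-empty dropWhile fails the predicate.
theorem head_dropWhile_false {α : Type} (p : α → Bool) : ∀ (l : List α) (c : α) (r : List α),
    List.dropWhile p l = c :: r → p c = false := by
  intro l
  induction l with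
  | nil => intro c r h; simp at h
  | cons a as ih =>
    intro c r h
    by_cases ha : p a = true
    · rw [List.dropWhile_cons_of_pos ha] at h; exact ih c r h
    · rw [List.dropWhile_cons_of_neg ha] at h
      cases h; simpa using ha

-- A non-empty stripped string starts with a non-whitespace character.
theorem strip_head (cs : List Char) (h : PySem.Chars.strip cs ≠ []) :
    ∃ c r, PySem.Chars.strip cs = c :: r ∧ PySem.Chars.isspace c = false := by
  obtain ⟨c, r, hcr⟩ := List.exists_cons_of_ne_nil h
  refine ⟨c, r, hcr, ?_⟩
  have hpre : PySem.Chars.strip cs <+: PySem.Chars.lstrip cs := by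
    unfold PySem.Chars.strip PySem.Chars.rstrip
    have := List.dropWhile_suffix (l := (PySem.Chars.lstrip cs).reverse) (p := PySem.Chars.isspace)
    obtain ⟨t, ht⟩ := this
    exact ⟨t.reverse, by rw [← List.reverse_append, ht, List.reverse_reverse]⟩
  rw [hcr] at hpre
  obtain ⟨t, ht⟩ := hpre
  have : List.dropWhile PySem.Chars.isspace cs = c :: (r ++ t) := by
    unfold PySem.Chars.lstrip at ht; rw [← ht]; rfl
  exact head_dropWhile_false _ cs c (r ++ t) this

-- Stripping a string whose first character is non-whitespace yields a non-empty string.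
theorem strip_cons_ne_nil (c : Char) (x : List Char) (hc : PySem.Chars.isspace c = false) :
    PySem.Chars.strip (c :: x) ≠ [] := by
  unfold PySem.Chars.strip PySem.Chars.lstrip PySem.Chars.rstrip
  rw [List.dropWhile_cons_of_neg (by simp [hc])]
  simp only [ne_eq, List.reverse_eq_nil_iff, List.dropWhile_eq_nil_iff]
  intro hall
  have := hall c (by simp)
  rw [hc] at this; exact Bool.false_ne_true this

-- ===== VERDICT (by name: the statement is the Claim_ definition above) =====
theorem get_first_line_spec : Claim_equal_get_first_line := by
  intro doc _
  unfold Spec_get_first_line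
  cases doc with
  | none => rfl
  | some s =>
    by_cases hs : s = ""
    · simp [get_first_line, get_first_line_alt, hs]
    · simp only [get_first_line, get_first_line_alt, if_neg hs]
      by_cases ht : PySem.Chars.strip s.toList = []
      · rw [ht]
        simp [PySem.Chars.splitOn, PySem.Chars.splitOn.go,
              PySem.Chars.splitOnMax, PySem.Chars.splitOnMax.go, glLoop,
              PySem.Chars.strip, PySem.Chars.lstrip, PySem.Chars.rstrip]
      · obtain ⟨c, r, htc, hcs⟩ := strip_head _ ht
        have hb : (c != '\n') = true := by
          simp only [bne_iff_ne, ne_eq]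
          intro h; rw [h] at hcs
          exact absurd hcs (by decide)
        set t := PySem.Chars.strip s.toList with hts
        obtain ⟨restA, hA⟩ := goA_head (t.length + 1) t [] [] (by omega)
        obtain ⟨restB, hB⟩ := goB_head (t.length + 1) t [] [] (by omega)
        have hsplitA : PySem.Chars.splitOn t ['\n']
            = (t.takeWhile (fun c => c != '\n')) :: restA := by
          unfold PySem.Chars.splitOn; simpa using hA
        have hsplitB : PySem.Chars.splitOnMax t ['\n'] 1
            = (t.takeWhile (fun c => c != '\n')) :: restB := by
          unfold PySem.Chars.splitOnMax
          rw [if_neg (by norm_num)]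
          simpa using hB
        have htw : t.takeWhile (fun c => c != '\n') = c :: r.takeWhile (fun c => c != '\n') := by
          rw [htc]; simp [hb]
        rw [hsplitA, hsplitB, htw]
        have hne := strip_cons_ne_nil c (r.takeWhile (fun c => c != '\n')) hcs
        simp [glLoop, hne]
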